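-- pv_equiv track=rewrite | github.com/weirdapps/etorotrade | trade_modules/committee_synthesis.py | canonicalize_impact
-- ===== SOURCE A (Python) =====
-- _IMPACT_CANONICAL = {
--     "VERY_POSITIVE": "HIGH_POSITIVE",
--     "STRONG_POSITIVE": "HIGH_POSITIVE",
--     "POSITIVE": "LOW_POSITIVE",
--     "SLIGHTLY_POSITIVE": "LOW_POSITIVE",
--     "MODERATE_POSITIVE": "LOW_POSITIVE",
--     "BULLISH": "LOW_POSITIVE",
--     "VERY_NEGATIVE": "HIGH_NEGATIVE",
--     "STRONG_NEGATIVE": "HIGH_NEGATIVE",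
--     "NEGATIVE": "LOW_NEGATIVE",
--     "SLIGHTLY_NEGATIVE": "LOW_NEGATIVE",
--     "MODERATE_NEGATIVE": "LOW_NEGATIVE",
--     "BEARISH": "LOW_NEGATIVE",
-- }
--
-- def canonicalize_impact(raw: str) -> str:
--     """Map agent impact variants to canonical 4-value system."""
--     upper = str(raw).strip().upper()
--     mapped = _IMPACT_CANONICAL.get(upper)
--     if mapped:
--         return mapped
--     # Substring fallback for unknown variants
--     if "POSITIVE" in upper or "BULLISH" in upper:
--         return "HIGH_POSITIVE" if any(w in upper for w in ("HIGH", "VERY", "STRONG")) else "LOW_POSITIVE"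
--     if "NEGATIVE" in upper or "BEARISH" in upper:
--         return "HIGH_NEGATIVE" if any(w in upper for w in ("HIGH", "VERY", "STRONG")) else "LOW_NEGATIVE"
--     return upper  # Pass through NEUTRAL, MIXED, etc.
-- ===== SOURCE B (Python) =====
-- def canonicalize_impact(raw: str) -> str:
--     """Map agent impact variants to canonical 4-value system.
--
--     The lookup table of the original is fully redundant with its substring
--     fallback, so B drops it and assembles the label from a level and a sign.
--     """
--     upper = str(raw).strip().upper()
--     if "POSITIVE" in upper or "BULLISH" in upper:
--         sign = "POSITIVE"
--     elif "NEGATIVE" in upper or "BEARISH" in upper: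
--         sign = "NEGATIVE"
--     else:
--         return upper  # Pass through NEUTRAL, MIXED, etc.
--     level = "HIGH" if any(w in upper for w in ("HIGH", "VERY", "STRONG")) else "LOW"
--     return f"{level}_{sign}"
-- ===== Notes on version B (the rewrite author's own statement) =====
-- stated objective: simpler
-- what changed: Drops the 12-entry _IMPACT_CANONICAL dict (provably redundant with the substring fallback) and builds the result from a sign and a level part instead of per-branch literals.
import Mathlib
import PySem

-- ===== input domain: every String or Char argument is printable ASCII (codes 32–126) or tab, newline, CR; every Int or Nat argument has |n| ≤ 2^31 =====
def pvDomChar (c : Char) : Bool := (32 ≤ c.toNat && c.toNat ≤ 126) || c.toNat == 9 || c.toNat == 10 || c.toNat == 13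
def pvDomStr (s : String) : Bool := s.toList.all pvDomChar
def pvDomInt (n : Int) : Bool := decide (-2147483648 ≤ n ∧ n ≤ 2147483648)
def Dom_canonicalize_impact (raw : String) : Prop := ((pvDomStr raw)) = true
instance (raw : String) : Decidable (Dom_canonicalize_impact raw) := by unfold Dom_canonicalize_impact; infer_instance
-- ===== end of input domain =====

-- B drops A's redundant lookup table and assembles the label from a level and a sign part (objective: simpler).

-- ===== PORT A =====
def pvImpactCanonical : PySem.Dict String String := PySem.Dict.ofList [
  ("VERY_POSITIVE", "HIGH_POSITIVE"),
  ("STRONG_POSITIVE", "HIGH_POSITIVE"),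
  ("POSITIVE", "LOW_POSITIVE"),
  ("SLIGHTLY_POSITIVE", "LOW_POSITIVE"),
  ("MODERATE_POSITIVE", "LOW_POSITIVE"),
  ("BULLISH", "LOW_POSITIVE"),
  ("VERY_NEGATIVE", "HIGH_NEGATIVE"),
  ("STRONG_NEGATIVE", "HIGH_NEGATIVE"),
  ("NEGATIVE", "LOW_NEGATIVE"),
  ("SLIGHTLY_NEGATIVE", "LOW_NEGATIVE"),
  ("MODERATE_NEGATIVE", "LOW_NEGATIVE"),
  ("BEARISH", "LOW_NEGATIVE")]

def canonicalize_impact (raw : String) : String :=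
  let upper := PySem.Str.upper (PySem.Str.strip raw)
  let mapped := pvImpactCanonical.get? upper
  -- Python's 'if mapped:' — truthy iff the lookup hit and the value is a nonempty string
  if (mapped.getD "") ≠ "" then mapped.getD ""
  else if PySem.Str.isIn "POSITIVE" upper || PySem.Str.isIn "BULLISH" upper then
    (if PySem.Str.isIn "HIGH" upper || PySem.Str.isIn "VERY" upper || PySem.Str.isIn "STRONG" upper
     then "HIGH_POSITIVE" else "LOW_POSITIVE")
  else if PySem.Str.isIn "NEGATIVE" upper || PySem.Str.isIn "BEARISH" upper then
    (if PySem.Str.isIn "HIGH" upper || PySem.Str.isIn "VERY" upper || PySem.Str.isIn "STRONG" upper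
     then "HIGH_NEGATIVE" else "LOW_NEGATIVE")
  else upper

-- ===== PORT B =====
def pvLevelLabel (upper sign : String) : String :=
  (if PySem.Str.isIn "HIGH" upper || PySem.Str.isIn "VERY" upper || PySem.Str.isIn "STRONG" upper
   then "HIGH" else "LOW") ++ "_" ++ sign

def canonicalize_impact_alt (raw : String) : String :=
  let upper := PySem.Str.upper (PySem.Str.strip raw)
  if PySem.Str.isIn "POSITIVE" upper || PySem.Str.isIn "BULLISH" upper then
    pvLevelLabel upper "POSITIVE"
  else if PySem.Str.isIn "NEGATIVE" upper || PySem.Str.isIn "BEARISH" upper then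
    pvLevelLabel upper "NEGATIVE"
  else upper

-- ===== PRECONDITION & SPEC =====
def Spec_canonicalize_impact (raw : String) (out : String) : Prop := out = canonicalize_impact_alt raw
instance (raw : String) (out : String) : Decidable (Spec_canonicalize_impact raw out) := by unfold Spec_canonicalize_impact; infer_instance

-- ===== CLAIM (what is proved, stated in full; the proofs are below) =====
def Claim_equal_canonicalize_impact : Prop := ∀ (raw : String), Dom_canonicalize_impact raw → Spec_canonicalize_impact raw (canonicalize_impact raw)

-- ===== LEMMAS AND PROOFS =====

-- the core fact: for EVERY upper string, A's body and B's body agree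
theorem canon_core_eq (u : String) :
    (let mapped := pvImpactCanonical.get? u
     if (mapped.getD "") ≠ "" then mapped.getD ""
     else if PySem.Str.isIn "POSITIVE" u || PySem.Str.isIn "BULLISH" u then
       (if PySem.Str.isIn "HIGH" u || PySem.Str.isIn "VERY" u || PySem.Str.isIn "STRONG" u
        then "HIGH_POSITIVE" else "LOW_POSITIVE")
     else if PySem.Str.isIn "NEGATIVE" u || PySem.Str.isIn "BEARISH" u then
       (if PySem.Str.isIn "HIGH" u || PySem.Str.isIn "VERY" u || PySem.Str.isIn "STRONG" u
        then "HIGH_NEGATIVE" else "LOW_NEGATIVE")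
     else u) =
    (if PySem.Str.isIn "POSITIVE" u || PySem.Str.isIn "BULLISH" u then
       pvLevelLabel u "POSITIVE"
     else if PySem.Str.isIn "NEGATIVE" u || PySem.Str.isIn "BEARISH" u then
       pvLevelLabel u "NEGATIVE"
     else u) := by
  have htbl : pvImpactCanonical = PySem.Dict.mk [
    ("VERY_POSITIVE", "HIGH_POSITIVE"), ("STRONG_POSITIVE", "HIGH_POSITIVE"),
    ("POSITIVE", "LOW_POSITIVE"), ("SLIGHTLY_POSITIVE", "LOW_POSITIVE"),
    ("MODERATE_POSITIVE", "LOW_POSITIVE"), ("BULLISH", "LOW_POSITIVE"),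
    ("VERY_NEGATIVE", "HIGH_NEGATIVE"), ("STRONG_NEGATIVE", "HIGH_NEGATIVE"),
    ("NEGATIVE", "LOW_NEGATIVE"), ("SLIGHTLY_NEGATIVE", "LOW_NEGATIVE"),
    ("MODERATE_NEGATIVE", "LOW_NEGATIVE"), ("BEARISH", "LOW_NEGATIVE")] := by decide
  simp only [htbl, PySem.Dict.get?_mk_cons, pvLevelLabel]
  by_cases h1 : ("VERY_POSITIVE" : String) = u
  · subst h1; decide
  by_cases h2 : ("STRONG_POSITIVE" : String) = u
  · subst h2; decide
  by_cases h3 : ("POSITIVE" : String) = u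
  · subst h3; decide
  by_cases h4 : ("SLIGHTLY_POSITIVE" : String) = u
  · subst h4; decide
  by_cases h5 : ("MODERATE_POSITIVE" : String) = u
  · subst h5; decide
  by_cases h6 : ("BULLISH" : String) = u
  · subst h6; decide
  by_cases h7 : ("VERY_NEGATIVE" : String) = u
  · subst h7; decide
  by_cases h8 : ("STRONG_NEGATIVE" : String) = u
  · subst h8; decide
  by_cases h9 : ("NEGATIVE" : String) = u
  · subst h9; decide
  by_cases h10 : ("SLIGHTLY_NEGATIVE" : String) = u
  · subst h10; decide
  by_cases h11 : ("MODERATE_NEGATIVE" : String) = u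
  · subst h11; decide
  by_cases h12 : ("BEARISH" : String) = u
  · subst h12; decide
  -- lookup misses: A takes its fallback, which matches B branch by branch
  simp only [beq_iff_eq, if_neg h1, if_neg h2, if_neg h3, if_neg h4, if_neg h5, if_neg h6,
    if_neg h7, if_neg h8, if_neg h9, if_neg h10, if_neg h11, if_neg h12,
    PySem.Dict.get?, List.find?_nil, Option.map_none, Option.getD_none, ne_eq,
    not_true_eq_false, if_false]
  split_ifs <;> rfl

-- ===== VERDICT (by name: the statement is the Claim_ definition above) =====
theorem canonicalize_impact_spec : Claim_equal_canonicalize_impact := by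
  intro raw _
  show canonicalize_impact raw = canonicalize_impact_alt raw
  unfold canonicalize_impact canonicalize_impact_alt
  exact canon_core_eq (PySem.Str.upper (PySem.Str.strip raw))
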